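-- pv_equiv track=rewrite | github.com/allenai/PathNet | pathnet/data/obqa_data_reader/data_reader_obqa.py | find_sentidx
-- ===== SOURCE A (Python) =====
-- from typing import Dict, List, Any, Tuple
--
-- def find_sentidx(doctoks: List[List[str]],
--                  word_idx: int) -> int:
--     """
--     find the sentidx given word idx
--     :param doctoks:
--     :param word_idx:
--     :return:
--     """
--     count = 0
--     for idx, doc in enumerate(doctoks):
--         count += len(doc)
--         if word_idx < count:
--             return idx
--     return len(doctoks) - 1
-- ===== SOURCE B (Python) =====
-- from bisect import bisect_right
-- from itertools import accumulate
-- from typing import List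
--
-- def find_sentidx(doctoks: List[List[str]], word_idx: int) -> int:
--     cums = list(accumulate(len(d) for d in doctoks))
--     i = bisect_right(cums, word_idx)
--     return i if i < len(doctoks) else len(doctoks) - 1
-- ===== Notes on version B (the rewrite author's own statement) =====
-- stated objective: alternative
-- what changed: Replaces the accumulate-and-test loop by a prefix-sum list plus bisect_right binary search with a clamp to len-1.
import Mathlib
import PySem

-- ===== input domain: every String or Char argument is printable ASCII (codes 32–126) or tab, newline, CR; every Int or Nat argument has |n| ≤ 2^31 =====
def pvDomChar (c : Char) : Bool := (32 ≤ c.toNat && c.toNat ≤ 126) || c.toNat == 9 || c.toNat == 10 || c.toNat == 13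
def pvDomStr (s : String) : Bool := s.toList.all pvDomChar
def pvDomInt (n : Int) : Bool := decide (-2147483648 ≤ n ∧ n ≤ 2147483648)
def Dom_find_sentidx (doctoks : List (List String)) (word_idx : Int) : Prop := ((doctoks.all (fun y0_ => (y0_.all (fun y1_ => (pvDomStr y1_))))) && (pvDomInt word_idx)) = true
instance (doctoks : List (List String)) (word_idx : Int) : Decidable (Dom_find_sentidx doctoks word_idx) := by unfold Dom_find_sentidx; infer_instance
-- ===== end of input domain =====

-- B replaces A's accumulate-and-test loop by a prefix-sum list and a bisect_right lookup (alternative decomposition; return value only).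
-- ===== PORT A =====
-- the for-loop of A: tracks running count and index, returns on the first hit, none if the loop ends
def fsAux (word_idx : Int) : List (List String) → Int → Int → Option Int
  | [], _, _ => none
  | d :: rest, idx, count =>
    let count' := count + (d.length : Int)
    if word_idx < count' then some idx else fsAux word_idx rest (idx + 1) count'

def find_sentidx (doctoks : List (List String)) (word_idx : Int) : Int :=
  match fsAux word_idx doctoks 0 0 with
  | some idx => idx
  | none => (doctoks.length : Int) - 1

-- ===== PORT B =====
-- itertools.accumulate over the sentence lengths (running sums)
def fsAccum : List Int → Int → List Int
  | [], _ => []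
  | x :: xs, c => (c + x) :: fsAccum xs (c + x)

-- bisect_right on the sorted running-sum list: number of elements ≤ x (the insertion point)
def fsBisectRight (cums : List Int) (x : Int) : Nat :=
  (cums.takeWhile (fun c => c ≤ x)).length

def find_sentidx_alt (doctoks : List (List String)) (word_idx : Int) : Int :=
  let cums := fsAccum (doctoks.map (fun d => (d.length : Int))) 0
  let i : Int := (fsBisectRight cums word_idx : Int)
  if i < (doctoks.length : Int) then i else (doctoks.length : Int) - 1

-- ===== PRECONDITION & SPEC =====
def Spec_find_sentidx (doctoks : List (List String)) (word_idx : Int) (out : Int) : Prop := out = find_sentidx_alt doctoks word_idx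
instance (doctoks : List (List String)) (word_idx : Int) (out : Int) : Decidable (Spec_find_sentidx doctoks word_idx out) := by unfold Spec_find_sentidx; infer_instance

-- ===== CLAIM (what is proved, stated in full; the proofs are below) =====
def Claim_equal_find_sentidx : Prop := ∀ (doctoks : List (List String)) (word_idx : Int), Dom_find_sentidx doctoks word_idx → Spec_find_sentidx doctoks word_idx (find_sentidx doctoks word_idx)

-- ===== LEMMAS AND PROOFS =====

-- ===== VERDICT (by name: the statement is the Claim_ definition above) =====
theorem fsAux_eq (word_idx : Int) :
    ∀ (l : List (List String)) (idx c : Int),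
      fsAux word_idx l idx c =
        (if fsBisectRight (fsAccum (l.map (fun d => (d.length : Int))) c) word_idx < l.length
         then some (idx + (fsBisectRight (fsAccum (l.map (fun d => (d.length : Int))) c) word_idx : Int))
         else none) := by
  intro l
  induction l with
  | nil => intro idx c; simp [fsAux, fsAccum, fsBisectRight]
  | cons d rest ih =>
    intro idx c
    simp only [fsAux, fsAccum, fsBisectRight, List.map, List.takeWhile]
    by_cases h : word_idx < c + (d.length : Int)
    · have h' : ¬ (c + (d.length : Int) ≤ word_idx) := by omega
      simp [h, h']
    · have h' : (c + (d.length : Int) ≤ word_idx) := by omega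
      simp only [h, if_false, h', decide_true]
      rw [ih (idx + 1) (c + (d.length : Int))]
      simp only [fsBisectRight, List.length_cons]
      split_ifs with h1 h2 h2
      · congr 1; push_cast; ring
      · omega
      · omega
      · rfl

theorem find_sentidx_spec : Claim_equal_find_sentidx := by
  intro doctoks word_idx _
  unfold Spec_find_sentidx find_sentidx find_sentidx_alt
  rw [fsAux_eq]
  split_ifs with h
  · simp [h]
  · simp only [if_neg h]
    push_cast at h ⊢
    omega
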